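-- pv_equiv track=rewrite | github.com/fresheneesz/experiments | python/enigma.py | _convert_nn
-- ===== SOURCE A (Python) =====
-- to_19 = ( 'zero',  'one',   'two',  'three', 'four',   'five',   'six',
--           'seven', 'eight', 'nine', 'ten',   'eleven', 'twelve', 'thirteen',
--           'fourteen', 'fifteen', 'sixteen', 'seventeen', 'eighteen', 'nineteen' )
--
-- tens  = ( 'twenty', 'thirty', 'forty', 'fifty', 'sixty', 'seventy', 'eighty', 'ninety')
--
-- def _convert_nn(val):
--     if val < 20:
--         return to_19[val]
--     for (dcap, dval) in ((k, 20 + (10 * v)) for (v, k) in enumerate(tens)):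
--         if dval + 10 > val:
--             if val % 10:
--                 return dcap + '-' + to_19[val % 10]
--             return dcap
-- ===== SOURCE B (Python) =====
-- to_19 = ( 'zero',  'one',   'two',  'three', 'four',   'five',   'six',
--           'seven', 'eight', 'nine', 'ten',   'eleven', 'twelve', 'thirteen',
--           'fourteen', 'fifteen', 'sixteen', 'seventeen', 'eighteen', 'nineteen' )
--
-- tens  = ( 'twenty', 'thirty', 'forty', 'fifty', 'sixty', 'seventy', 'eighty', 'ninety')
--
-- def _convert_nn(val):
--     if val < 20:
--         return to_19[val]
--     q, r = divmod(val, 10)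
--     if q - 2 < len(tens):
--         return tens[q - 2] + ('-' + to_19[r] if r else '')
-- ===== Notes on version B (the rewrite author's own statement) =====
-- stated objective: simpler
-- what changed: Replaces A's generator-driven scan over the tens buckets with a closed-form divmod: the tens word is indexed directly from the quotient behind a plain in-range check, no loop at all.
-- outside the precondition, e.g. on _convert_nn(100): A returns None, B returns None; on _convert_nn(-21): A raises IndexError, B raises IndexError
import Mathlib
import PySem

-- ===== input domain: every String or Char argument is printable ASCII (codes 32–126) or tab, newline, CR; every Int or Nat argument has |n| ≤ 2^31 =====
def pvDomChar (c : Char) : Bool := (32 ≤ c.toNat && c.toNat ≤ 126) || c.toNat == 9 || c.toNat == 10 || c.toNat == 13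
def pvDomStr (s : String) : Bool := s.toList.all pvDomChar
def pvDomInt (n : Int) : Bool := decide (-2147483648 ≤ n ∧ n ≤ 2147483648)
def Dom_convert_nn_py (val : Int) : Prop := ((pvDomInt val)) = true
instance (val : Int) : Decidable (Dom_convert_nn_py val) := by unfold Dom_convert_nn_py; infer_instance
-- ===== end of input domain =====

-- B replaces A's scan over the tens buckets with a closed-form divmod index (simpler, loop-free).


def pvTo19 : List String :=
  [ "zero", "one", "two", "three", "four", "five", "six",
    "seven", "eight", "nine", "ten", "eleven", "twelve", "thirteen",
    "fourteen", "fifteen", "sixteen", "seventeen", "eighteen", "nineteen" ]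

def pvTens : List String :=
  [ "twenty", "thirty", "forty", "fifty", "sixty", "seventy", "eighty", "ninety" ]

-- ===== PORT A =====
-- A's loop over ((k, 20 + 10*v) for (v,k) in enumerate(tens)); falls through to None
-- (the "" result is unreachable inside Pre_).
def convertNnLoopA (val : Int) : List (Int × String) → String
  | [] => ""
  | (v, k) :: rest =>
      let dval : Int := 20 + 10 * v
      if dval + 10 > val then
        if PySem.Int.mod val 10 ≠ 0 then
          k ++ "-" ++ ((PySem.List.pyGet? pvTo19 (PySem.Int.mod val 10)).getD "")
        else k
      else convertNnLoopA val rest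

def convert_nn_py (val : Int) : String :=
  if val < 20 then (PySem.List.pyGet? pvTo19 val).getD ""
  else convertNnLoopA val (PySem.List.enumerate pvTens)

-- ===== PORT B =====
def convert_nn_py_alt (val : Int) : String :=
  if val < 20 then (PySem.List.pyGet? pvTo19 val).getD ""
  else
    let q := PySem.Int.floordiv val 10
    let r := PySem.Int.mod val 10
    if q - 2 < (pvTens.length : Int) then
      ((PySem.List.pyGet? pvTens (q - 2)).getD "")
        ++ (if r ≠ 0 then "-" ++ ((PySem.List.pyGet? pvTo19 r).getD "") else "")
    else ""

-- ===== PRECONDITION & SPEC =====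
-- Pre_ excludes val ≥ 100, where A falls off its loop and returns None (not a str),
-- and val ≤ -21, where A's to_19[val] raises IndexError.
def Pre_convert_nn_py (val : Int) : Prop := -20 ≤ val ∧ val ≤ 99
instance (val : Int) : Decidable (Pre_convert_nn_py val) := by unfold Pre_convert_nn_py; infer_instance
def pvWitness_convert_nn_py : Int := (42)
def Spec_convert_nn_py (val : Int) (out : String) : Prop := out = convert_nn_py_alt val
instance (val : Int) (out : String) : Decidable (Spec_convert_nn_py val out) := by unfold Spec_convert_nn_py; infer_instance

-- ===== CLAIM (what is proved, stated in full; the proofs are below) =====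
def Claim_equal_convert_nn_py : Prop := ∀ (val : Int), Dom_convert_nn_py val → Pre_convert_nn_py val → Spec_convert_nn_py val (convert_nn_py val)

-- ===== LEMMAS AND PROOFS =====

-- ===== VERDICT (by name: the statement is the Claim_ definition above) =====
theorem convert_nn_py_spec : Claim_equal_convert_nn_py := by
  intro val _ hp
  unfold Spec_convert_nn_py
  obtain ⟨h1, h2⟩ := hp
  interval_cases val <;> rfl
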